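-- pv_equiv track=rewrite | github.com/coin-or/prtpy | prtpy/partitioning/Horowitz_And_Shani.py | compute_each_subset_sum
-- ===== SOURCE A (Python) =====
-- def compute_each_subset_sum(s, k):
--     """
--     compute the sum of each subset sum
--     """
--     sets = [[]]
--     for i in range(0, len(s)):  # create a new set for each one
--         for j in range(0, len(sets)):
--             t = sets[j] + [s[i]]
--             sets.append(t)
--             if sum(t) == k:  # compare the sum to the target k
--                 return t
--     return None  # no found
-- ===== SOURCE B (Python) =====
-- def compute_each_subset_sum(s, k):
--     """
--     compute the sum of each subset sum
--     """
--     for mask in range(1, 2 ** len(s)):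
--         t = []
--         m = mask
--         for x in s:
--             if m & 1:
--                 t.append(x)
--             m >>= 1
--         if sum(t) == k:
--             return t
--     return None
-- ===== Notes on version B (the rewrite author's own statement) =====
-- stated objective: simpler
-- what changed: B enumerates candidate subsets by a single integer bitmask counter, decoding each subset directly from the mask's bits, instead of A's growing list that stores every previously generated subset and extends stored entries; B keeps no list of earlier subsets.
import Mathlib
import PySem

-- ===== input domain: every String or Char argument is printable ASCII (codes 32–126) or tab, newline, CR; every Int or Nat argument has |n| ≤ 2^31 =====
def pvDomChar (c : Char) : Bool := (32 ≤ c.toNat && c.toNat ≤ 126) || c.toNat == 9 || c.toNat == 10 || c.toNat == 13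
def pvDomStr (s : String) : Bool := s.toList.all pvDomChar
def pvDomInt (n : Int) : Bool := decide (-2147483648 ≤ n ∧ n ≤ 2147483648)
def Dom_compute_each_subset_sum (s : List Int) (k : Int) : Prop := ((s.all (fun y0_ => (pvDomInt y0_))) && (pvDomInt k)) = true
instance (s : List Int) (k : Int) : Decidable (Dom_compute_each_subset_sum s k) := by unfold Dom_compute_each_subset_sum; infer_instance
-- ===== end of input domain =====

-- B replaces A's stored list of all previously generated subsets by a single bitmask
-- counter, decoding each candidate subset directly from the mask's bits (objective:
-- simpler; same enumeration order, same return value).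

-- ===== PORT A =====
-- inner 'for j in range(0, len(sets))': 'fuel' counts the remaining j-iterations
-- (len(sets) is evaluated once at loop entry in Python); sets[j] is always in range,
-- so List.getD with default [] is exact.
def pvInnerA (si k : Int) (sets : List (List Int)) (j : Nat) :
    Nat → (List (List Int)) ⊕ (List Int)
  | 0 => Sum.inl sets
  | fuel + 1 =>
    let t := (sets.getD j []) ++ [si]
    let sets' := sets ++ [t]
    if t.sum = k then Sum.inr t
    else pvInnerA si k sets' (j + 1) fuel

-- outer 'for i in range(0, len(s))': i is used only as s[i], so we walk the elements.
def pvOuterA (k : Int) (sets : List (List Int)) : List Int → Option (List Int)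
  | [] => none
  | si :: rest =>
    match pvInnerA si k sets 0 sets.length with
    | Sum.inr t => some t
    | Sum.inl sets' => pvOuterA k sets' rest

def compute_each_subset_sum (s : List Int) (k : Int) : Option (List Int) :=
  pvOuterA k [[]] s

-- ===== PORT B =====
-- 't = []; m = mask; for x in s: if m & 1: t.append(x); m >>= 1'
def pvMaskSubset : List Int → Nat → List Int
  | [], _ => []
  | x :: rest, m =>
    if m % 2 = 1 then x :: pvMaskSubset rest (m / 2) else pvMaskSubset rest (m / 2)

-- 'for mask in range(1, 2 ** len(s)): ... return t' / 'return None'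
def pvLoopB (s : List Int) (k : Int) : List Nat → Option (List Int)
  | [] => none
  | m :: ms =>
    let t := pvMaskSubset s m
    if t.sum = k then some t else pvLoopB s k ms

def compute_each_subset_sum_alt (s : List Int) (k : Int) : Option (List Int) :=
  pvLoopB s k (List.range' 1 (2 ^ s.length - 1))

-- ===== PRECONDITION & SPEC =====
def Spec_compute_each_subset_sum (s : List Int) (k : Int) (out : Option (List Int)) : Prop := out = compute_each_subset_sum_alt s k
instance (s : List Int) (k : Int) (out : Option (List Int)) : Decidable (Spec_compute_each_subset_sum s k out) := by unfold Spec_compute_each_subset_sum; infer_instance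

-- ===== CLAIM (what is proved, stated in full; the proofs are below) =====
def Claim_equal_compute_each_subset_sum : Prop := ∀ (s : List Int) (k : Int), Dom_compute_each_subset_sum s k → Spec_compute_each_subset_sum s k (compute_each_subset_sum s k)

-- ===== LEMMAS AND PROOFS =====

theorem pvMaskSubset_zero (b : List Int) : pvMaskSubset b 0 = [] := by
  induction b with
  | nil => rfl
  | cons x rest ih => simp [pvMaskSubset, ih]

theorem pvMaskSubset_append (a b : List Int) (m : Nat) :
    pvMaskSubset (a ++ b) m = pvMaskSubset a m ++ pvMaskSubset b (m / 2 ^ a.length) := by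
  induction a generalizing m with
  | nil => simp [pvMaskSubset]
  | cons x a' ih =>
    have h2 : m / 2 / 2 ^ a'.length = m / 2 ^ (x :: a').length := by
      rw [Nat.div_div_eq_div_mul]
      simp [List.length_cons, pow_succ, Nat.mul_comm]
    by_cases h : m % 2 = 1 <;> simp [pvMaskSubset, h, ih, h2]

theorem pvMaskSubset_high (a : List Int) (j : Nat) (hj : j < 2 ^ a.length) :
    pvMaskSubset a (2 ^ a.length + j) = pvMaskSubset a j := by
  induction a generalizing j with
  | nil => rfl
  | cons x a' ih =>
    simp only [List.length_cons] at hj ⊢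
    have hp : 2 ^ (a'.length + 1) = 2 ^ a'.length * 2 := by rw [pow_succ]
    have hmod : (2 ^ (a'.length + 1) + j) % 2 = j % 2 := by rw [hp]; omega
    have hdiv : (2 ^ (a'.length + 1) + j) / 2 = 2 ^ a'.length + j / 2 := by rw [hp]; omega
    have hj' : j / 2 < 2 ^ a'.length := by rw [hp] at hj; omega
    by_cases h : j % 2 = 1 <;>
      simp [pvMaskSubset, hmod, hdiv, h, ih _ hj']

theorem pvLoopB_append (s : List Int) (k : Int) (l1 l2 : List Nat) :
    pvLoopB s k (l1 ++ l2) =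
      (match pvLoopB s k l1 with
       | some t => some t
       | none => pvLoopB s k l2) := by
  induction l1 with
  | nil => simp [pvLoopB]
  | cons m ms ih =>
    by_cases h : (pvMaskSubset s m).sum = k <;> simp [pvLoopB, h, ih]

-- the subset A builds at inner step j (with i elements processed before si) is
-- exactly the subset of mask 2^i + j of the full list s.
theorem pvT_eq (done rest : List Int) (si : Int) (j : Nat) (hj : j < 2 ^ done.length) :
    pvMaskSubset (done ++ si :: rest) j ++ [si]
      = pvMaskSubset (done ++ si :: rest) (2 ^ done.length + j) := by
  have hdiv0 : j / 2 ^ done.length = 0 := Nat.div_eq_of_lt hj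
  have hdiv1 : (2 ^ done.length + j) / 2 ^ done.length = 1 := by
    rw [Nat.add_comm, Nat.add_div_right _ (Nat.two_pow_pos _), hdiv0]
  have hhigh : pvMaskSubset done (2 ^ done.length + j) = pvMaskSubset done j :=
    pvMaskSubset_high done j hj
  rw [pvMaskSubset_append, pvMaskSubset_append, hdiv0, hdiv1, hhigh]
  simp [pvMaskSubset, pvMaskSubset_zero]

theorem pvInner_eq (done rest : List Int) (si k : Int) (c : Nat) :
    ∀ j, j + c = 2 ^ done.length →
    pvInnerA si k ((List.range (2 ^ done.length + j)).map
        (pvMaskSubset (done ++ si :: rest))) j c =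
      (match pvLoopB (done ++ si :: rest) k (List.range' (2 ^ done.length + j) c) with
       | some t => Sum.inr t
       | none => Sum.inl ((List.range (2 ^ (done.length + 1))).map
           (pvMaskSubset (done ++ si :: rest)))) := by
  induction c with
  | zero =>
    intro j hj
    have : 2 ^ done.length + j = 2 ^ (done.length + 1) := by
      rw [pow_succ]; omega
    simp [pvInnerA, pvLoopB, this]
  | succ c ih =>
    intro j hj
    set s := done ++ si :: rest with hs
    have hjlt : j < 2 ^ done.length := by omega
    have hget : ((List.range (2 ^ done.length + j)).map (pvMaskSubset s)).getD j []
        = pvMaskSubset s j := by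
      rw [List.getD_eq_getElem?_getD]
      simp [(by omega : j < 2 ^ done.length + j)]
    have ht : pvMaskSubset s j ++ [si] = pvMaskSubset s (2 ^ done.length + j) :=
      pvT_eq done rest si j hjlt
    have hsets' : ((List.range (2 ^ done.length + j)).map (pvMaskSubset s))
          ++ [pvMaskSubset s (2 ^ done.length + j)]
        = (List.range (2 ^ done.length + (j + 1))).map (pvMaskSubset s) := by
      rw [show 2 ^ done.length + (j + 1) = (2 ^ done.length + j) + 1 by omega,
        List.range_succ]
      simp
    have hrange' : List.range' (2 ^ done.length + j) (c + 1)
        = (2 ^ done.length + j) :: List.range' (2 ^ done.length + (j + 1)) c := by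
      rw [List.range'_succ, Nat.add_assoc]
    rw [pvInnerA, hrange']
    simp only [hget, ht, hsets']
    by_cases h : (pvMaskSubset s (2 ^ done.length + j)).sum = k
    · simp [pvLoopB, h]
    · simp only [pvLoopB, h]
      exact ih (j + 1) (by omega)

theorem pvOuter_eq (k : Int) (rest : List Int) :
    ∀ done : List Int,
    pvOuterA k ((List.range (2 ^ done.length)).map (pvMaskSubset (done ++ rest))) rest
      = pvLoopB (done ++ rest) k
          (List.range' (2 ^ done.length) (2 ^ (done ++ rest).length - 2 ^ done.length)) := by
  induction rest with
  | nil =>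
    intro done
    simp [pvOuterA, pvLoopB]
  | cons si rest' ih =>
    intro done
    have hlen : ((List.range (2 ^ done.length)).map
        (pvMaskSubset (done ++ si :: rest'))).length = 2 ^ done.length := by simp
    have hmono : 2 ^ (done.length + 1) ≤ 2 ^ (done ++ si :: rest').length := by
      apply Nat.pow_le_pow_right (by norm_num)
      simp
    have htail : 2 ^ (done.length + 1) = 2 ^ done.length + 2 ^ done.length := by
      rw [pow_succ]; omega
    have hsplit := @List.range'_append (2 ^ done.length) (2 ^ done.length)
      (2 ^ (done ++ si :: rest').length - 2 ^ (done.length + 1)) 1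
    simp only [one_mul] at hsplit
    have hcount : 2 ^ done.length
          + (2 ^ (done ++ si :: rest').length - 2 ^ (done.length + 1))
        = 2 ^ (done ++ si :: rest').length - 2 ^ done.length := by omega
    rw [hcount] at hsplit
    have hinner := pvInner_eq done rest' si k (2 ^ done.length) 0 (by omega)
    simp only [Nat.add_zero] at hinner
    rw [pvOuterA, hlen, hinner]
    have hih := ih (done ++ [si])
    have hlen2 : (done ++ [si]).length = done.length + 1 := by simp
    have htail : 2 ^ done.length + 2 ^ done.length = 2 ^ (done.length + 1) := by
      rw [pow_succ]; omega
    rw [← hsplit, pvLoopB_append]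
    simp only [htail]
    by_cases h : pvLoopB (done ++ si :: rest') k
        (List.range' (2 ^ done.length) (2 ^ done.length)) = none
    · rw [h]
      have := hih
      rw [hlen2] at this
      simpa [List.append_assoc] using this
    · obtain ⟨t, ht⟩ := Option.ne_none_iff_exists'.mp h
      rw [ht]

theorem pv_main (s : List Int) (k : Int) :
    compute_each_subset_sum s k = compute_each_subset_sum_alt s k := by
  unfold compute_each_subset_sum compute_each_subset_sum_alt
  have h0 := pvOuter_eq k s []
  simp only [List.length_nil, pow_zero, List.nil_append] at h0
  have hinit : (List.range 1).map (pvMaskSubset s) = [[]] := by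
    simp [List.range_succ, pvMaskSubset_zero]
  rw [hinit] at h0
  exact h0

-- ===== VERDICT (by name: the statement is the Claim_ definition above) =====
theorem compute_each_subset_sum_spec : Claim_equal_compute_each_subset_sum := by
  intro s k _
  exact pv_main s k
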